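-- pv_equiv track=rewrite | github.com/joelsjlee/textbook | text_to_md/text2md.py | get_title_and_author
-- ===== SOURCE A (Python) =====
-- def get_title_and_author(header):
--     lines = header.splitlines()
--     text_title = ""
--     text_author = ""
--     text_title_found = False
--     text_author_found = False
--     for line in lines:
--         if text_title_found and text_author_found:
--             break
--         if (not text_title_found) and line.startswith("Title: "):
--             text_title = line[7:].strip()
--             text_title_found = True
--         if (not text_author_found) and line.startswith("Author: "):
--             text_author = line[8:].strip()
--             text_author_found = True
--     return text_title, text_author
-- ===== SOURCE B (Python) =====
-- def _first_field(lines, prefix):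
--     """First line starting with prefix, with the prefix removed and stripped; '' if none."""
--     return next((line[len(prefix):].strip() for line in lines if line.startswith(prefix)), "")
--
-- def get_title_and_author(header):
--     lines = header.splitlines()
--     return _first_field(lines, "Title: "), _first_field(lines, "Author: ")
-- ===== Notes on version B (the rewrite author's own statement) =====
-- stated objective: simpler
-- what changed: Replaces the flag-driven interleaved loop (with found-flags and early break) by two independent first-match scans over the split lines, one per field.
import Mathlib
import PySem

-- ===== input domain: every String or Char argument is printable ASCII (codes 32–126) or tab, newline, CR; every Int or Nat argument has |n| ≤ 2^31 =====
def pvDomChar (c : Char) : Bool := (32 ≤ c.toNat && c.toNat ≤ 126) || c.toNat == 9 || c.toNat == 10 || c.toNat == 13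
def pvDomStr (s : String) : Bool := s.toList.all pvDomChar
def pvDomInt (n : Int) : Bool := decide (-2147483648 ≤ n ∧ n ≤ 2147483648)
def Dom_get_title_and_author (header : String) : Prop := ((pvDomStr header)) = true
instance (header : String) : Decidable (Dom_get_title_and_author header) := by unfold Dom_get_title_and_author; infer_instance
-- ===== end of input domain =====

-- B replaces A's flag-driven single loop by two independent first-match scans (one per field); same cost, simpler.

-- ===== PORT A =====
def loopA_get_title_and_author : List String → String → String → Bool → Bool → String × String
  | [], t, a, _, _ => (t, a)
  | line :: rest, t, a, tf, af =>
    if tf && af then (t, a)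
    else
      let t' := if !tf && PySem.Str.startswith line "Title: " then PySem.Str.strip (PySem.Str.slice line (some 7) none) else t
      let tf' := if !tf && PySem.Str.startswith line "Title: " then true else tf
      let a' := if !af && PySem.Str.startswith line "Author: " then PySem.Str.strip (PySem.Str.slice line (some 8) none) else a
      let af' := if !af && PySem.Str.startswith line "Author: " then true else af
      loopA_get_title_and_author rest t' a' tf' af'

def get_title_and_author (header : String) : String × String :=
  loopA_get_title_and_author (PySem.Str.splitlines header) "" "" false false

-- ===== PORT B =====
-- first line starting with `pre`, with its first `n` chars removed and stripped; "" if none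
def firstField_alt (lines : List String) (pre : String) (n : Int) : String :=
  match lines.find? (fun line => PySem.Str.startswith line pre) with
  | some line => PySem.Str.strip (PySem.Str.slice line (some n) none)
  | none => ""

def get_title_and_author_alt (header : String) : String × String :=
  let lines := PySem.Str.splitlines header
  (firstField_alt lines "Title: " 7, firstField_alt lines "Author: " 8)

-- ===== PRECONDITION & SPEC =====
def Spec_get_title_and_author (header : String) (out : String × String) : Prop := out = get_title_and_author_alt header
instance (header : String) (out : String × String) : Decidable (Spec_get_title_and_author header out) := by unfold Spec_get_title_and_author; infer_instance

-- ===== CLAIM (what is proved, stated in full; the proofs are below) =====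
def Claim_equal_get_title_and_author : Prop := ∀ (header : String), Dom_get_title_and_author header → Spec_get_title_and_author header (get_title_and_author header)

-- ===== LEMMAS AND PROOFS =====

-- ===== VERDICT (by name: the statement is the Claim_ definition above) =====
-- generalized default version of firstField_alt, used as the loop invariant's right-hand side
def fieldD (lines : List String) (pre : String) (n : Int) (dflt : String) : String :=
  match lines.find? (fun line => PySem.Str.startswith line pre) with
  | some line => PySem.Str.strip (PySem.Str.slice line (some n) none)
  | none => dflt

theorem loopA_eq (lines : List String) : ∀ (t a : String) (tf af : Bool),
    loopA_get_title_and_author lines t a tf af =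
      ((if tf then t else fieldD lines "Title: " 7 t),
       (if af then a else fieldD lines "Author: " 8 a)) := by
  induction lines with
  | nil => intro t a tf af; simp [loopA_get_title_and_author, fieldD]
  | cons line rest ih =>
    intro t a tf af
    by_cases htf : tf = true <;> by_cases haf : af = true <;>
      by_cases hT : PySem.Str.startswith line "Title: " = true <;>
      by_cases hA : PySem.Str.startswith line "Author: " = true <;>
      (simp [loopA_get_title_and_author, fieldD, List.find?, htf, haf, ih]) <;> simp_all

theorem firstField_eq_fieldD (lines : List String) (pre : String) (n : Int) :
    firstField_alt lines pre n = fieldD lines pre n "" := by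
  simp [firstField_alt, fieldD]

theorem get_title_and_author_spec : Claim_equal_get_title_and_author := by
  intro header _
  show _ = _
  simp [get_title_and_author, get_title_and_author_alt, loopA_eq, firstField_eq_fieldD]
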